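-- pv_equiv track=rewrite | github.com/delhomer/advent_of_code | 2020/day16/part02.py | scan_line
-- ===== SOURCE A (Python) =====
-- def scan_line(ticket, rules):
--     def predicat(t):
--         return any(
--             [
--                 any([interval[0] <= t <= interval[1] for interval in values])
--                 for values in rules.values()
--             ]
--         )
--     return all(predicat(t) for t in ticket)
-- ===== SOURCE B (Python) =====
-- def scan_line(ticket, rules):
--     # Flatten all rule intervals once and sort them by start; each ticket value is
--     # then checked by a single early-exit scan over the sorted interval list.
--     intervals = sorted((iv for values in rules.values() for iv in values),
--                        key=lambda iv: iv[0])
--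
--     def ok(t):
--         for lo, hi in intervals:
--             if t < lo:
--                 return False
--             if t <= hi:
--                 return True
--         return False
--
--     return all(ok(t) for t in ticket)
-- ===== Notes on version B (the rewrite author's own statement) =====
-- stated objective: alternative
-- what changed: Replaces the per-value nested any-over-rules/any-over-intervals scan with a flattened interval list sorted by start built once, each ticket value checked by a single early-exit scan over that sorted list.
import Mathlib
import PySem

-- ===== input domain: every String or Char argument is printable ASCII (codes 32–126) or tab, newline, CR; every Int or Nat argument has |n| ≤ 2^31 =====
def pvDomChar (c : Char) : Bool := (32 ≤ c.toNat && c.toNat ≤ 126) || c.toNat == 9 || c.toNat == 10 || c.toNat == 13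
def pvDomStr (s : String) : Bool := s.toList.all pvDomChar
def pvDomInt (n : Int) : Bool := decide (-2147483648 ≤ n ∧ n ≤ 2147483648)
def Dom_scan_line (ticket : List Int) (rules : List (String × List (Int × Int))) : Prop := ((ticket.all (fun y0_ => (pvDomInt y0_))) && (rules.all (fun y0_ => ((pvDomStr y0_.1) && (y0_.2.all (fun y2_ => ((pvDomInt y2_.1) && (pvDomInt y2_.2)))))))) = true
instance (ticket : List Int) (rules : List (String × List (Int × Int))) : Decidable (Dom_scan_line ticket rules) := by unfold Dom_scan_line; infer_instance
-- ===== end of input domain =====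

-- B replaces A's nested any-over-rules/any-over-intervals check per ticket value with one
-- flattened interval list sorted by start and an early-exit scan per value (objective: alternative).

-- ===== PORT A =====
def scan_line (ticket : List Int) (rules : List (String × List (Int × Int))) : Bool :=
  ticket.all (fun t =>
    (((PySem.Dict.ofList rules).values.map (fun values =>
        (values.map (fun interval => decide (interval.1 ≤ t ∧ t ≤ interval.2))).any id)).any id))

-- ===== PORT B =====
-- early-exit scan over a list of intervals sorted by start
def pvOkScan (t : Int) : List (Int × Int) → Bool
  | [] => false
  | (lo, hi) :: rest => if t < lo then false else if t ≤ hi then true else pvOkScan t rest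

def scan_line_alt (ticket : List Int) (rules : List (String × List (Int × Int))) : Bool :=
  let intervals := PySem.List.sorted ((PySem.Dict.ofList rules).values.flatMap (fun v => v)) (fun iv => iv.1) false
  ticket.all (fun t => pvOkScan t intervals)

-- ===== PRECONDITION & SPEC =====
def Spec_scan_line (ticket : List Int) (rules : List (String × List (Int × Int))) (out : Bool) : Prop := out = scan_line_alt ticket rules
instance (ticket : List Int) (rules : List (String × List (Int × Int))) (out : Bool) : Decidable (Spec_scan_line ticket rules out) := by unfold Spec_scan_line; infer_instance

-- ===== CLAIM (what is proved, stated in full; the proofs are below) =====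
def Claim_equal_scan_line : Prop := ∀ (ticket : List Int) (rules : List (String × List (Int × Int))), Dom_scan_line ticket rules → Spec_scan_line ticket rules (scan_line ticket rules)

-- ===== LEMMAS AND PROOFS =====
-- On a list pairwise-sorted by start, the early-exit scan computes the existential check.
theorem pvOkScan_eq_any (t : Int) (L : List (Int × Int))
    (h : L.Pairwise (fun a b => a.1 ≤ b.1)) :
    pvOkScan t L = L.any (fun iv => decide (iv.1 ≤ t ∧ t ≤ iv.2)) := by
  induction L with
  | nil => rfl
  | cons iv rest ih =>
    obtain ⟨lo, hi⟩ := iv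
    rw [List.pairwise_cons] at h
    simp only [pvOkScan, List.any_cons]
    split_ifs with h1 h2
    · have : ∀ jv ∈ rest, ¬(jv.1 ≤ t ∧ t ≤ jv.2) := by
        intro jv hjv hc
        exact absurd (le_trans (h.1 jv hjv) hc.1) (not_le.mpr h1)
      symm
      simp only [Bool.or_eq_false_iff, List.any_eq_false, decide_eq_false_iff_not]
      exact ⟨by omega, fun jv hjv => by simpa using this jv hjv⟩
    · have : (lo ≤ t ∧ t ≤ hi) := by omega
      simp [this]
    · rw [ih h.2]
      have : ¬(lo ≤ t ∧ t ≤ hi) := by omega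
      simp [this]

theorem scan_line_spec : Claim_equal_scan_line := by
  intro ticket rules _
  unfold Spec_scan_line scan_line scan_line_alt
  refine congrArg ticket.all (funext fun t => ?_)
  rw [pvOkScan_eq_any t _ (PySem.List.sorted_pairwise _ _)]
  rw [(PySem.List.sorted_perm _ _ _).any_eq]
  simp [List.any_map]
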